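-- pv_equiv track=rewrite | github.com/Fioy-01/Dissertation | mis_fever/code/bert_real_runner.py | majority_minority_classes
-- ===== SOURCE A (Python) =====
-- from typing import List, Dict, Tuple, Optional
--
-- def majority_minority_classes(counts: Dict[str, int]) -> Tuple[List[str], List[str]]:
--     if not counts:
--         return [], []
--     min_cnt = min(counts.values())
--     max_cnt = max(counts.values())
--     mins = [k for k, v in counts.items() if v == min_cnt]
--     maxs = [k for k, v in counts.items() if v == max_cnt]
--     return mins, maxs
-- ===== SOURCE B (Python) =====
-- from typing import List, Dict, Tuple, Optional
--
-- def majority_minority_classes(counts: Dict[str, int]) -> Tuple[List[str], List[str]]: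
--     it = iter(counts.items())
--     first = next(it, None)
--     if first is None:
--         return [], []
--     k0, v0 = first
--     min_cnt = max_cnt = v0
--     mins = [k0]
--     maxs = [k0]
--     for k, v in it:
--         if v < min_cnt:
--             min_cnt = v
--             mins = [k]
--         elif v == min_cnt:
--             mins.append(k)
--         if v > max_cnt:
--             max_cnt = v
--             maxs = [k]
--         elif v == max_cnt:
--             maxs.append(k)
--     return mins, maxs
-- ===== Notes on version B (the rewrite author's own statement) =====
-- stated objective: alternative
-- what changed: Replaces A's four passes (min, max, two filtering comprehensions) with one fused pass that maintains running min/max counts and resets or extends the mins/maxs lists as new extremes appear.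
import Mathlib
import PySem

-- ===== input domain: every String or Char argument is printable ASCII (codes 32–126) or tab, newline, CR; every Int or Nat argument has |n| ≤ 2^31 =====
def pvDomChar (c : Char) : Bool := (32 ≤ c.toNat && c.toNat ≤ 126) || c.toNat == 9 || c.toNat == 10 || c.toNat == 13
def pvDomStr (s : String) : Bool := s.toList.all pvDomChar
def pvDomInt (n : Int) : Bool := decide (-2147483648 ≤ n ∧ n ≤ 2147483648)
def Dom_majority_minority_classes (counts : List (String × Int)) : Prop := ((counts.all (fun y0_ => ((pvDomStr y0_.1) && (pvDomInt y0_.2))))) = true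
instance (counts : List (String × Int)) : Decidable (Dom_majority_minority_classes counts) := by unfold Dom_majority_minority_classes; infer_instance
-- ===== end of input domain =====

-- B replaces A's four passes over the dict by one fused pass keeping running min/max and the lists.

-- ===== PORT A =====
-- A: if empty return ([],[]); else min/max of values, then two filtering comprehensions.
def majority_minority_classes (counts : List (String × Int)) : List String × List String :=
  match counts with
  | [] => ([], [])
  | c :: t =>
    let vals := (c :: t).map Prod.snd
    -- min?/max? are `some` here since the list is nonempty; the .getD default is unreachable
    let min_cnt := (PySem.List.min? vals (fun x => x)).getD 0
    let max_cnt := (PySem.List.max? vals (fun x => x)).getD 0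
    let mins := ((c :: t).filter (fun kv => decide (kv.2 = min_cnt))).map Prod.fst
    let maxs := ((c :: t).filter (fun kv => decide (kv.2 = max_cnt))).map Prod.fst
    (mins, maxs)

-- ===== PORT B =====
def mmcStepMin (st : Int × List String) (kv : String × Int) : Int × List String :=
  if kv.2 < st.1 then (kv.2, [kv.1])
  else if kv.2 = st.1 then (st.1, st.2 ++ [kv.1])
  else st

def mmcStepMax (st : Int × List String) (kv : String × Int) : Int × List String :=
  if kv.2 > st.1 then (kv.2, [kv.1])
  else if kv.2 = st.1 then (st.1, st.2 ++ [kv.1])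
  else st

def mmcStep (st : (Int × List String) × (Int × List String)) (kv : String × Int) :
    (Int × List String) × (Int × List String) :=
  (mmcStepMin st.1 kv, mmcStepMax st.2 kv)

def majority_minority_classes_alt (counts : List (String × Int)) : List String × List String :=
  match counts with
  | [] => ([], [])
  | (k0, v0) :: t =>
    let st := t.foldl mmcStep ((v0, [k0]), (v0, [k0]))
    (st.1.2, st.2.2)

-- ===== PRECONDITION & SPEC =====
def Spec_majority_minority_classes (counts : List (String × Int)) (out : List String × List String) : Prop := out = majority_minority_classes_alt counts
instance (counts : List (String × Int)) (out : List String × List String) : Decidable (Spec_majority_minority_classes counts out) := by unfold Spec_majority_minority_classes; infer_instance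

-- ===== CLAIM (what is proved, stated in full; the proofs are below) =====
def Claim_equal_majority_minority_classes : Prop := ∀ (counts : List (String × Int)), Dom_majority_minority_classes counts → Spec_majority_minority_classes counts (majority_minority_classes counts)

-- ===== LEMMAS AND PROOFS =====

theorem mmc_foldl_min_le (t : List (String × Int)) : ∀ a : Int,
    t.foldl (fun m kv => min m kv.2) a ≤ a := by
  induction t with
  | nil => intro a; simp
  | cons x t ih =>
      intro a
      calc t.foldl (fun m kv => min m kv.2) (min a x.2) ≤ min a x.2 := ih _
        _ ≤ a := min_le_left _ _

theorem mmc_foldl_max_ge (t : List (String × Int)) : ∀ a : Int,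
    a ≤ t.foldl (fun m kv => max m kv.2) a := by
  induction t with
  | nil => intro a; simp
  | cons x t ih =>
      intro a
      calc a ≤ max a x.2 := le_max_left _ _
        _ ≤ t.foldl (fun m kv => max m kv.2) (max a x.2) := ih _

theorem mmc_foldl_min (t : List (String × Int)) : ∀ (c : Int) (ks : List String),
    t.foldl mmcStepMin (c, ks) =
      (t.foldl (fun m kv => min m kv.2) c,
       (if t.foldl (fun m kv => min m kv.2) c = c then ks else []) ++
         (t.filter (fun kv => decide (kv.2 = t.foldl (fun m kv => min m kv.2) c))).map Prod.fst) := by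
  induction t with
  | nil => intro c ks; simp
  | cons x t ih =>
      intro c ks
      have hle : t.foldl (fun m kv => min m kv.2) (min c x.2) ≤ min c x.2 :=
        mmc_foldl_min_le t _
      simp only [List.foldl_cons, mmcStepMin]
      rcases lt_trichotomy x.2 c with h | h | h
      · rw [if_pos h, ih]
        have hmin : min c x.2 = x.2 := min_eq_right h.le
        simp only [hmin] at hle ⊢
        have hne : t.foldl (fun m kv => min m kv.2) x.2 ≠ c := by omega
        simp only [List.filter_cons, hne]
        by_cases he : x.2 = t.foldl (fun m kv => min m kv.2) x.2
        · simp [← he]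
        · have : ¬ (t.foldl (fun m kv => min m kv.2) x.2 = x.2) := fun hh => he hh.symm
          simp [he, this]
      · rw [if_neg (by omega), if_pos h, ih]
        have hmin : min c x.2 = c := min_eq_right (le_of_eq h.symm) ▸ by omega
        have hmin' : min c x.2 = c := by omega
        simp only [hmin'] at hle ⊢
        by_cases hc : t.foldl (fun m kv => min m kv.2) c = c
        · simp [h, hc]
        · have : ¬ (x.2 = t.foldl (fun m kv => min m kv.2) c) := by omega
          simp [hc, this]
      · rw [if_neg (by omega), if_neg (by omega), ih]
        have hmin' : min c x.2 = c := by omega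
        simp only [hmin'] at hle ⊢
        have : ¬ (x.2 = t.foldl (fun m kv => min m kv.2) c) := by omega
        simp [this]

theorem mmc_foldl_max (t : List (String × Int)) : ∀ (c : Int) (ks : List String),
    t.foldl mmcStepMax (c, ks) =
      (t.foldl (fun m kv => max m kv.2) c,
       (if t.foldl (fun m kv => max m kv.2) c = c then ks else []) ++
         (t.filter (fun kv => decide (kv.2 = t.foldl (fun m kv => max m kv.2) c))).map Prod.fst) := by
  induction t with
  | nil => intro c ks; simp
  | cons x t ih =>
      intro c ks
      have hge : max c x.2 ≤ t.foldl (fun m kv => max m kv.2) (max c x.2) :=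
        mmc_foldl_max_ge t _
      simp only [List.foldl_cons, mmcStepMax]
      rcases lt_trichotomy x.2 c with h | h | h
      · rw [if_neg (by omega), if_neg (by omega), ih]
        have hmax : max c x.2 = c := by omega
        simp only [hmax] at hge ⊢
        have : ¬ (x.2 = t.foldl (fun m kv => max m kv.2) c) := by omega
        simp [this]
      · rw [if_neg (by omega), if_pos h, ih]
        have hmax : max c x.2 = c := by omega
        simp only [hmax] at hge ⊢
        by_cases hc : t.foldl (fun m kv => max m kv.2) c = c
        · simp [h, hc]
        · have : ¬ (x.2 = t.foldl (fun m kv => max m kv.2) c) := by omega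
          simp [hc, this]
      · rw [if_pos h, ih]
        have hmax : max c x.2 = x.2 := by omega
        simp only [hmax] at hge ⊢
        have hne : t.foldl (fun m kv => max m kv.2) x.2 ≠ c := by omega
        simp only [List.filter_cons, if_neg hne]
        by_cases he : x.2 = t.foldl (fun m kv => max m kv.2) x.2
        · simp [← he]
        · have : ¬ (t.foldl (fun m kv => max m kv.2) x.2 = x.2) := fun hh => he hh.symm
          simp [he, this]

theorem mmc_foldl_pair (t : List (String × Int)) :
    ∀ (a b : Int × List String),
      t.foldl mmcStep (a, b) = (t.foldl mmcStepMin a, t.foldl mmcStepMax b) := by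
  induction t with
  | nil => intro a b; rfl
  | cons x t ih => intro a b; simp [List.foldl_cons, mmcStep, ih]

-- ===== VERDICT (by name: the statement is the Claim_ definition above) =====
theorem majority_minority_classes_spec : Claim_equal_majority_minority_classes := by
  unfold Claim_equal_majority_minority_classes
  intro counts _
  unfold Spec_majority_minority_classes
  match counts with
  | [] => rfl
  | (k0, v0) :: t =>
    simp only [majority_minority_classes, majority_minority_classes_alt,
      mmc_foldl_pair, mmc_foldl_min, mmc_foldl_max]
    simp only [List.map_cons]
    simp only [PySem.List.min?_id_cons, PySem.List.max?_id_cons, Option.getD_some]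
    have hmin : (t.map Prod.snd).foldl min v0 = t.foldl (fun m kv => min m kv.2) v0 := by
      rw [List.foldl_map]
    have hmax : (t.map Prod.snd).foldl max v0 = t.foldl (fun m kv => max m kv.2) v0 := by
      rw [List.foldl_map]
    simp only [hmin, hmax]
    have hle : t.foldl (fun m kv => min m kv.2) v0 ≤ v0 := mmc_foldl_min_le t v0
    have hge : v0 ≤ t.foldl (fun m kv => max m kv.2) v0 := mmc_foldl_max_ge t v0
    refine Prod.ext_iff.mpr ⟨?_, ?_⟩
    · by_cases hc : t.foldl (fun m kv => min m kv.2) v0 = v0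
      · simp [hc]
      · have : ¬ (v0 = t.foldl (fun m kv => min m kv.2) v0) := fun hh => hc hh.symm
        simp [hc, this]
    · by_cases hc : t.foldl (fun m kv => max m kv.2) v0 = v0
      · simp [hc]
      · have : ¬ (v0 = t.foldl (fun m kv => max m kv.2) v0) := fun hh => hc hh.symm
        simp [hc, this]
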